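-- pv_equiv track=rewrite | github.com/hasanaranna/CSE_318_Artificial_Intelligence_Sessional | Offline-3 Adversarial Search/engine/heuristics.py | count_positional_advantage
-- ===== SOURCE A (Python) =====
-- def count_positional_advantage(board, color):
--     count = 0
--     for row_idx, row in enumerate(board):
--         for col_idx, cell in enumerate(row):
--             if cell != '0' and cell.endswith(color):
--                 # Check if the cell is on the edge or corner
--                 if (row_idx == 0 or row_idx == len(board) - 1) or (col_idx == 0 or col_idx == len(row) - 1):
--                     count += 1
--     return count
-- ===== SOURCE B (Python) =====
-- def count_positional_advantage(board, color):
--     # Scan only the perimeter: first/last rows fully, other rows only their end cells.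
--     def ok(cell):
--         return cell != '0' and cell.endswith(color)
--     n = len(board)
--     total = 0
--     for i, row in enumerate(board):
--         if i == 0 or i == n - 1:
--             total += sum(1 for c in row if ok(c))
--         elif row:
--             total += 1 if ok(row[0]) else 0
--             if len(row) > 1:
--                 total += 1 if ok(row[-1]) else 0
--     return total
-- ===== Notes on version B (the rewrite author's own statement) =====
-- stated objective: faster
-- what changed: B visits only the border cells (first and last rows fully, plus the two end cells of each middle row) instead of testing the edge condition on every cell of the board.
import Mathlib
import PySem

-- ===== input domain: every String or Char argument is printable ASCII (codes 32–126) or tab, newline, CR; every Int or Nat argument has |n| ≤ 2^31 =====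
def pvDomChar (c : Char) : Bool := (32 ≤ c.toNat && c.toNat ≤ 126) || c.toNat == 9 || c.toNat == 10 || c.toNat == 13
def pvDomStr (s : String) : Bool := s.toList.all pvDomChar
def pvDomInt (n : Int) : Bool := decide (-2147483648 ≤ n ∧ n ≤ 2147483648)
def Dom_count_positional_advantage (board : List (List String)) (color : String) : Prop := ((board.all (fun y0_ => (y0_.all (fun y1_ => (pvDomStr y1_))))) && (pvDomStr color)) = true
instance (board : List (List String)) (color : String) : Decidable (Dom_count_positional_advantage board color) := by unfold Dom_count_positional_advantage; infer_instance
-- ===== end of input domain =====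

-- B counts only border cells (full first/last rows, end cells of middle rows) instead of testing every cell; faster on large boards.


-- ===== PORT A =====
def count_positional_advantage (board : List (List String)) (color : String) : Int :=
  (PySem.List.enumerate board 0).foldl (fun count rp =>
    (PySem.List.enumerate rp.2 0).foldl (fun c cp =>
      if cp.2 ≠ "0" ∧ PySem.Str.endswith cp.2 color = true then
        if (rp.1 = 0 ∨ rp.1 = (board.length : Int) - 1) ∨ (cp.1 = 0 ∨ cp.1 = (rp.2.length : Int) - 1) then
          c + 1
        else c
      else c) count) 0

-- ===== PORT B =====
def cpaOk (cell color : String) : Bool := cell != "0" && PySem.Str.endswith cell color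

def count_positional_advantage_alt (board : List (List String)) (color : String) : Int :=
  let n := board.length
  (PySem.List.enumerate board 0).foldl (fun total rp =>
    if rp.1 = 0 ∨ rp.1 = (n : Int) - 1 then
      total + (rp.2.countP (fun c => cpaOk c color) : Int)
    else
      match rp.2 with
      | [] => total
      | c0 :: rest =>
        let t1 := total + (if cpaOk c0 color then 1 else 0)
        match rest with
        | [] => t1
        | r0 :: rs => t1 + (if cpaOk ((r0 :: rs).getLast (by simp)) color then 1 else 0)) 0

-- ===== PRECONDITION & SPEC =====
def Spec_count_positional_advantage (board : List (List String)) (color : String) (out : Int) : Prop := out = count_positional_advantage_alt board color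
instance (board : List (List String)) (color : String) (out : Int) : Decidable (Spec_count_positional_advantage board color out) := by unfold Spec_count_positional_advantage; infer_instance

-- ===== CLAIM (what is proved, stated in full; the proofs are below) =====
def Claim_equal_count_positional_advantage : Prop := ∀ (board : List (List String)) (color : String), Dom_count_positional_advantage board color → Spec_count_positional_advantage board color (count_positional_advantage board color)

-- ===== LEMMAS AND PROOFS =====

-- Full-row inner loop: every cell passes the positional test, so it counts the matching cells.
theorem cpa_inner_full (q : String → Bool) (l : List String) : ∀ (s acc : Int),
    (PySem.List.enumerate l s).foldl (fun c cp => if q cp.2 = true then c + 1 else c) acc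
      = acc + (l.countP q : Int) := by
  induction l with
  | nil => intro s acc; simp [PySem.List.enumerate_nil]
  | cons a t ih =>
    intro s acc
    simp only [PySem.List.enumerate_cons, List.foldl_cons, ih, List.countP_cons]
    split
    · push_cast; ring
    · push_cast; ring

-- Middle-row tail: among indices s..L (s ≥ 1) only the last index L can fire, hitting the last cell.
theorem cpa_inner_tail (q : String → Bool) (t : List String) : ∀ (s acc L : Int), 1 ≤ s →
    L = s + (t.length : Int) - 1 →
    (PySem.List.enumerate t s).foldl
        (fun c cp => if q cp.2 = true ∧ (cp.1 = 0 ∨ cp.1 = L) then c + 1 else c) acc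
      = acc + (match t.getLast? with | none => 0 | some x => if q x = true then 1 else 0) := by
  induction t with
  | nil => intro s acc L _ _; simp [PySem.List.enumerate_nil]
  | cons a t ih =>
    intro s acc L hs hL
    simp only [PySem.List.enumerate_cons, List.foldl_cons]
    cases t with
    | nil =>
      have hLs : L = s := by simp at hL; omega
      simp [PySem.List.enumerate_nil, hLs]
      split <;> simp_all
    | cons b u =>
      have hne : ¬ (s = 0 ∨ s = L) := by
        simp only [List.length_cons] at hL; push_cast at hL; omega
      have hhead : (if q a = true ∧ (s = 0 ∨ s = L) then acc + 1 else acc) = acc := by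
        simp [hne]
      rw [hhead, ih (s + 1) acc L (by omega)
        (by simp only [List.length_cons] at hL ⊢; push_cast at hL ⊢; omega)]
      simp [List.getLast?_cons_cons]

-- ===== VERDICT (by name: the statement is the Claim_ definition above) =====
theorem count_positional_advantage_spec : Claim_equal_count_positional_advantage := by
  intro board color _
  unfold Spec_count_positional_advantage count_positional_advantage count_positional_advantage_alt
  apply PySem.List.foldl_congr_mem
  intro acc rp _
  set q : String → Bool := fun c => cpaOk c color with hq
  have hcond : ∀ (cp : Int × String),
      (cp.2 ≠ "0" ∧ PySem.Str.endswith cp.2 color = true) ↔ q cp.2 = true := by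
    intro cp; simp [hq, cpaOk]
  by_cases hrow : rp.1 = 0 ∨ rp.1 = (board.length : Int) - 1
  · rw [if_pos hrow]
    have : (PySem.List.enumerate rp.2 0).foldl (fun c cp =>
        if cp.2 ≠ "0" ∧ PySem.Str.endswith cp.2 color = true then
          if (rp.1 = 0 ∨ rp.1 = (board.length : Int) - 1) ∨ (cp.1 = 0 ∨ cp.1 = (rp.2.length : Int) - 1) then
            c + 1 else c
        else c) acc
        = (PySem.List.enumerate rp.2 0).foldl (fun c cp => if q cp.2 = true then c + 1 else c) acc := by
      apply PySem.List.foldl_congr_mem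
      intro a cp _
      by_cases h : q cp.2 = true
      · rw [if_pos ((hcond cp).mpr h), if_pos (Or.inl hrow), if_pos h]
      · rw [if_neg (fun hc => h ((hcond cp).mp hc)), if_neg h]
    rw [this, cpa_inner_full]
    
  · rw [if_neg hrow]
    have hstep : (PySem.List.enumerate rp.2 0).foldl (fun c cp =>
        if cp.2 ≠ "0" ∧ PySem.Str.endswith cp.2 color = true then
          if (rp.1 = 0 ∨ rp.1 = (board.length : Int) - 1) ∨ (cp.1 = 0 ∨ cp.1 = (rp.2.length : Int) - 1) then
            c + 1 else c
        else c) acc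
        = (PySem.List.enumerate rp.2 0).foldl (fun c cp =>
            if q cp.2 = true ∧ (cp.1 = 0 ∨ cp.1 = (rp.2.length : Int) - 1) then c + 1 else c) acc := by
      apply PySem.List.foldl_congr_mem
      intro a cp _
      by_cases h : q cp.2 = true
      · rw [if_pos ((hcond cp).mpr h)]
        by_cases hp : cp.1 = 0 ∨ cp.1 = (rp.2.length : Int) - 1
        · rw [if_pos (Or.inr hp), if_pos ⟨h, hp⟩]
        · rw [if_neg (fun hc => hc.elim (fun h1 => hrow h1) hp), if_neg (fun hc => hp hc.2)]
      · rw [if_neg (fun hc => h ((hcond cp).mp hc)), if_neg (fun hc => h hc.1)]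
    rw [hstep]
    cases hr : rp.2 with
    | nil => simp [PySem.List.enumerate_nil]
    | cons c0 rest =>
      rw [PySem.List.enumerate_cons, List.foldl_cons]
      have hhead : (if q c0 = true ∧ ((0 : Int) = 0 ∨ (0 : Int) = ((c0 :: rest).length : Int) - 1) then acc + 1 else acc)
          = acc + (if cpaOk c0 color then 1 else 0) := by
        by_cases h : q c0 = true
        · rw [if_pos ⟨h, Or.inl rfl⟩]; simp [hq] at h; simp [h]
        · rw [if_neg (fun hc => h hc.1)]; simp [hq] at h; simp [h]
      rw [hhead, cpa_inner_tail q rest (0 + 1) _ _ (by omega)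
        (by push_cast [List.length_cons]; ring)]
      cases rest with
      | nil => simp
      | cons r0 rs =>
        simp only []
        rw [List.getLast?_eq_some_getLast (by simp)]
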